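-- pv_equiv track=rewrite | github.com/kelxpad/cs33-codes | lab3/3a/lab03a.py | sum_value_lists
-- ===== SOURCE A (Python) =====
-- def sum_value_lists(a: int, b: int) -> int:
--     if not a or not b:
--         return 0
--
--     a = sorted(a)
--     b = sorted(b)
--
--     na = len(a)
--     nb = len(b)
--
--     # prefix sums of a
--     prefix_a = [0] * (na + 1)
--     for i in range(na):
--         prefix_a[i + 1] = prefix_a[i] + a[i]
--
--     total = 0
--     j = 0
--
--     # first term: sum a * (b <= a)
--     for i in range(na):
--         while j < nb and b[j] <= a[i]:
--             j += 1
--         total += a[i] * j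
--
--     # second term: sum b * (a < b)
--     i = 0
--     for j in range(nb):
--         while i < na and a[i] < b[j]:
--             i += 1
--         total += b[j] * i
--
--     return total
-- ===== SOURCE B (Python) =====
-- def sum_value_lists(a: int, b: int) -> int:
--     return sum(max(x, y) for x in a for y in b)
-- ===== Notes on version B (the rewrite author's own statement) =====
-- stated objective: simpler
-- what changed: Replaced the sort + prefix-sum + two two-pointer scans with a direct double sum of max(x,y) over all pairs, which is what the function computes.
import Mathlib
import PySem

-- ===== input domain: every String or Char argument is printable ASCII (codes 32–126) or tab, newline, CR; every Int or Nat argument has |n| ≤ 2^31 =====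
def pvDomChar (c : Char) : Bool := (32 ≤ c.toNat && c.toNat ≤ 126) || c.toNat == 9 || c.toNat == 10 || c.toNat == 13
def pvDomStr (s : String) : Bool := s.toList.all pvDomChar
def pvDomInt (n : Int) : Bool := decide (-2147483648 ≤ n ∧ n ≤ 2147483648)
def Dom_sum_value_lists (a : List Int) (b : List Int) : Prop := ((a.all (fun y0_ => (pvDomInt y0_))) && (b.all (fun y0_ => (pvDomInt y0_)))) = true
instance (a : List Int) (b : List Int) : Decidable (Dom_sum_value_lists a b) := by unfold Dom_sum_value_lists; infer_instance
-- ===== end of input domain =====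

-- B replaces A's sort + prefix-sums + two-pointer scans by the direct double sum of max(x,y) over all pairs (simpler; not faster).


-- ===== PORT A =====
-- 'while j < nb and b[j] <= a[i]: j += 1' over the remaining suffix of sorted b
def pvAdvLe (x : Int) : List Int → Int → (List Int × Int)
  | [], j => ([], j)
  | y :: ys, j => if y ≤ x then pvAdvLe x ys (j + 1) else (y :: ys, j)

-- 'for i in range(na): <while>; total += a[i] * j'
def pvLoop1 : List Int → List Int → Int → Int → Int
  | [], _, _, total => total
  | x :: rest, bs, j, total =>
      let r := pvAdvLe x bs j
      pvLoop1 rest r.1 r.2 (total + x * r.2)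

-- 'while i < na and a[i] < b[j]: i += 1'
def pvAdvLt (y : Int) : List Int → Int → (List Int × Int)
  | [], i => ([], i)
  | x :: xs, i => if x < y then pvAdvLt y xs (i + 1) else (x :: xs, i)

-- 'for j in range(nb): <while>; total += b[j] * i'
def pvLoop2 : List Int → List Int → Int → Int → Int
  | [], _, _, total => total
  | y :: rest, xs, i, total =>
      let r := pvAdvLt y xs i
      pvLoop2 rest r.1 r.2 (total + y * r.2)

def sum_value_lists (a : List Int) (b : List Int) : Int :=
  if a = [] ∨ b = [] then 0
  else
    let a' := PySem.List.sorted a (fun x => x) false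
    let b' := PySem.List.sorted b (fun x => x) false
    -- prefix sums of a: computed by the Python but never used in the result
    let _prefix_a := a'.foldl (fun p x => p ++ [p.getLast! + x]) [(0 : Int)]
    let t1 := pvLoop1 a' b' 0 0
    pvLoop2 b' a' 0 t1

-- ===== PORT B =====
def sum_value_lists_alt (a : List Int) (b : List Int) : Int :=
  (a.map (fun x => (b.map (fun y => max x y)).sum)).sum

-- ===== PRECONDITION & SPEC =====
def Spec_sum_value_lists (a : List Int) (b : List Int) (out : Int) : Prop := out = sum_value_lists_alt a b
instance (a : List Int) (b : List Int) (out : Int) : Decidable (Spec_sum_value_lists a b out) := by unfold Spec_sum_value_lists; infer_instance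

-- ===== CLAIM (what is proved, stated in full; the proofs are below) =====
def Claim_equal_sum_value_lists : Prop := ∀ (a : List Int) (b : List Int), Dom_sum_value_lists a b → Spec_sum_value_lists a b (sum_value_lists a b)

-- ===== LEMMAS AND PROOFS =====

-- pvAdvLe is takeWhile/dropWhile with a counter
theorem pvAdvLe_eq (x : Int) : ∀ (bs : List Int) (j : Int),
    pvAdvLe x bs j = (bs.dropWhile (fun y => decide (y ≤ x)),
                      j + ((bs.takeWhile (fun y => decide (y ≤ x))).length : Int)) := by
  intro bs
  induction bs with
  | nil => intro j; simp [pvAdvLe]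
  | cons y ys ih =>
    intro j
    by_cases h : y ≤ x
    · simp [pvAdvLe, List.dropWhile, List.takeWhile, h, ih]; ring
    · simp [pvAdvLe, List.dropWhile, List.takeWhile, h]

theorem pvAdvLt_eq (y : Int) : ∀ (xs : List Int) (i : Int),
    pvAdvLt y xs i = (xs.dropWhile (fun x => decide (x < y)),
                      i + ((xs.takeWhile (fun x => decide (x < y))).length : Int)) := by
  intro xs
  induction xs with
  | nil => intro i; simp [pvAdvLt]
  | cons x xs ih =>
    intro i
    by_cases h : x < y
    · simp [pvAdvLt, List.dropWhile, List.takeWhile, h, ih]; ring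
    · simp [pvAdvLt, List.dropWhile, List.takeWhile, h]

-- on a sorted list, takeWhile of a downward-closed predicate counts all matches
theorem takeWhile_length_eq_countP (p : Int → Bool)
    (hmono : ∀ u v : Int, u ≤ v → p v = true → p u = true) :
    ∀ (bs : List Int), bs.Pairwise (· ≤ ·) →
      (bs.takeWhile p).length = bs.countP p := by
  intro bs
  induction bs with
  | nil => intro _; simp
  | cons y ys ih =>
    intro hp
    rw [List.pairwise_cons] at hp
    by_cases h : p y = true
    · simp [List.takeWhile, h, ih hp.2]
    · have : ys.countP p = 0 := by
        rw [List.countP_eq_zero]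
        intro v hv hpv
        exact h (hmono y v (hp.1 v hv) hpv)
      simp [List.takeWhile, h, this]
theorem pvLoop1_eq (b : List Int) (hb : b.Pairwise (· ≤ ·)) :
    ∀ (as pre bs : List Int) (total : Int),
      as.Pairwise (· ≤ ·) →
      b = pre ++ bs →
      (∀ y ∈ pre, ∀ x ∈ as, y ≤ x) →
      pvLoop1 as bs (pre.length : Int) total
        = total + (as.map (fun x => x * (b.countP (fun y => decide (y ≤ x)) : Int))).sum := by
  intro as
  induction as with
  | nil => intro pre bs total _ _ _; simp [pvLoop1]
  | cons x rest ih =>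
    intro pre bs total ha hsplit hpre
    rw [List.pairwise_cons] at ha
    have hbs : bs.Pairwise (· ≤ ·) := (hsplit ▸ hb).sublist (List.sublist_append_right pre bs) |>.imp id
    have htw : (bs.takeWhile (fun y => decide (y ≤ x))).length
        = bs.countP (fun y => decide (y ≤ x)) := by
      apply takeWhile_length_eq_countP _ _ bs hbs
      intro u v huv hpv
      simp at hpv ⊢; omega
    have hcount : (pre.length : Int) + ((bs.takeWhile (fun y => decide (y ≤ x))).length : Int)
        = (b.countP (fun y => decide (y ≤ x)) : Int) := by
      have hpcount : pre.countP (fun y => decide (y ≤ x)) = pre.length := by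
        rw [List.countP_eq_length]
        intro y hy; simp [hpre y hy x (by simp)]
      rw [hsplit, List.countP_append, hpcount, htw]; push_cast; ring
    simp only [pvLoop1, pvAdvLe_eq]
    have hsplit' : b = (pre ++ bs.takeWhile (fun y => decide (y ≤ x)))
        ++ bs.dropWhile (fun y => decide (y ≤ x)) := by
      rw [List.append_assoc, List.takeWhile_append_dropWhile]; exact hsplit
    have hpre' : ∀ y ∈ pre ++ bs.takeWhile (fun y => decide (y ≤ x)), ∀ x' ∈ rest, y ≤ x' := by
      intro y hy x' hx'
      rcases List.mem_append.1 hy with h1 | h2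
      · exact hpre y h1 x' (by simp [hx'])
      · have hyx : y ≤ x := by
          have := List.mem_takeWhile_imp h2; simpa using this
        exact le_trans hyx (ha.1 x' hx')
    have := ih (pre ++ bs.takeWhile (fun y => decide (y ≤ x)))
               (bs.dropWhile (fun y => decide (y ≤ x)))
               (total + x * ((pre.length : Int) + ((bs.takeWhile (fun y => decide (y ≤ x))).length : Int)))
               ha.2 hsplit' hpre'
    simp only [List.length_append] at this
    push_cast at this
    rw [this, hcount]
    simp [List.map_cons, List.sum_cons]
    ring

theorem pvLoop2_eq (a : List Int) (ha : a.Pairwise (· ≤ ·)) :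
    ∀ (bs pre xs : List Int) (total : Int),
      bs.Pairwise (· ≤ ·) →
      a = pre ++ xs →
      (∀ x ∈ pre, ∀ y ∈ bs, x < y) →
      pvLoop2 bs xs (pre.length : Int) total
        = total + (bs.map (fun y => y * (a.countP (fun x => decide (x < y)) : Int))).sum := by
  intro bs
  induction bs with
  | nil => intro pre xs total _ _ _; simp [pvLoop2]
  | cons y rest ih =>
    intro pre xs total hbp hsplit hpre
    rw [List.pairwise_cons] at hbp
    have hxs : xs.Pairwise (· ≤ ·) := (hsplit ▸ ha).sublist (List.sublist_append_right pre xs) |>.imp id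
    have htw : (xs.takeWhile (fun x => decide (x < y))).length
        = xs.countP (fun x => decide (x < y)) := by
      apply takeWhile_length_eq_countP _ _ xs hxs
      intro u v huv hpv
      simp at hpv ⊢; omega
    have hcount : (pre.length : Int) + ((xs.takeWhile (fun x => decide (x < y))).length : Int)
        = (a.countP (fun x => decide (x < y)) : Int) := by
      have hpcount : pre.countP (fun x => decide (x < y)) = pre.length := by
        rw [List.countP_eq_length]
        intro x hx; simp [hpre x hx y (by simp)]
      rw [hsplit, List.countP_append, hpcount, htw]; push_cast; ring
    simp only [pvLoop2, pvAdvLt_eq]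
    have hsplit' : a = (pre ++ xs.takeWhile (fun x => decide (x < y)))
        ++ xs.dropWhile (fun x => decide (x < y)) := by
      rw [List.append_assoc, List.takeWhile_append_dropWhile]; exact hsplit
    have hpre' : ∀ x ∈ pre ++ xs.takeWhile (fun x => decide (x < y)), ∀ y' ∈ rest, x < y' := by
      intro x hx y' hy'
      rcases List.mem_append.1 hx with h1 | h2
      · exact hpre x h1 y' (by simp [hy'])
      · have hxy : x < y := by
          have := List.mem_takeWhile_imp h2; simpa using this
        exact lt_of_lt_of_le hxy (hbp.1 y' hy')
    have := ih (pre ++ xs.takeWhile (fun x => decide (x < y)))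
               (xs.dropWhile (fun x => decide (x < y)))
               (total + y * ((pre.length : Int) + ((xs.takeWhile (fun x => decide (x < y))).length : Int)))
               hbp.2 hsplit' hpre'
    simp only [List.length_append] at this
    push_cast at this
    rw [this, hcount]
    simp [List.map_cons, List.sum_cons]
    ring

-- per-element identity: x * |{y∈b : y ≤ x}| + Σ_{y∈b, x<y} y = Σ_{y∈b} max x y
theorem per_elem_identity (x : Int) : ∀ (b : List Int),
    x * (b.countP (fun y => decide (y ≤ x)) : Int)
      + (b.map (fun y => if x < y then y else 0)).sum
    = (b.map (fun y => max x y)).sum := by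
  intro b
  induction b with
  | nil => simp
  | cons y ys ih =>
    by_cases h : y ≤ x
    · have hmax : max x y = x := max_eq_left h
      simp [h, not_lt.2 h]
      linarith [ih]
    · have hxy : x < y := not_le.1 h
      have hmax : max x y = y := max_eq_right (le_of_lt hxy)
      simp [h, hxy, hmax]
      linarith [ih]

-- the two column sums together equal the full double sum of max
theorem double_sum_identity : ∀ (a b : List Int),
    (a.map (fun x => x * (b.countP (fun y => decide (y ≤ x)) : Int))).sum
      + (b.map (fun y => y * (a.countP (fun x => decide (x < y)) : Int))).sum
    = (a.map (fun x => (b.map (fun y => max x y)).sum)).sum := by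
  intro a
  induction a with
  | nil => intro b; simp
  | cons x rest ih =>
    intro b
    have hsplit : (b.map (fun y => y * ((x :: rest).countP (fun x' => decide (x' < y)) : Int))).sum
        = (b.map (fun y => if x < y then y else 0)).sum
          + (b.map (fun y => y * (rest.countP (fun x' => decide (x' < y)) : Int))).sum := by
      induction b with
      | nil => simp
      | cons y ys ihb =>
        simp only [List.map_cons, List.sum_cons, ihb]
        rw [List.countP_cons]
        by_cases h : x < y
        · simp [h]; ring
        · simp [h]; ring
    simp only [List.map_cons, List.sum_cons, hsplit, ← ih b]
    have := per_elem_identity x b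
    linarith

-- sorting changes neither the countP's nor the sums (permutation invariance)
theorem sorted_sum_countP (a b : List Int) :
    ((PySem.List.sorted a (fun x => x) false).map
        (fun x => x * ((PySem.List.sorted b (fun x => x) false).countP (fun y => decide (y ≤ x)) : Int))).sum
      = (a.map (fun x => x * (b.countP (fun y => decide (y ≤ x)) : Int))).sum := by
  have hb : ∀ x : Int, (PySem.List.sorted b (fun x => x) false).countP (fun y => decide (y ≤ x))
      = b.countP (fun y => decide (y ≤ x)) := fun x =>
    (PySem.List.sorted_perm b (fun x => x) false).countP_eq _
  calc ((PySem.List.sorted a (fun x => x) false).map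
          (fun x => x * ((PySem.List.sorted b (fun x => x) false).countP (fun y => decide (y ≤ x)) : Int))).sum
      = ((PySem.List.sorted a (fun x => x) false).map
          (fun x => x * (b.countP (fun y => decide (y ≤ x)) : Int))).sum := by
        simp only [hb]
    _ = (a.map (fun x => x * (b.countP (fun y => decide (y ≤ x)) : Int))).sum :=
        ((PySem.List.sorted_perm a (fun x => x) false).map _).sum_eq

theorem sorted_sum_countP' (a b : List Int) :
    ((PySem.List.sorted b (fun x => x) false).map
        (fun y => y * ((PySem.List.sorted a (fun x => x) false).countP (fun x => decide (x < y)) : Int))).sum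
      = (b.map (fun y => y * (a.countP (fun x => decide (x < y)) : Int))).sum := by
  have ha : ∀ y : Int, (PySem.List.sorted a (fun x => x) false).countP (fun x => decide (x < y))
      = a.countP (fun x => decide (x < y)) := fun y =>
    (PySem.List.sorted_perm a (fun x => x) false).countP_eq _
  calc ((PySem.List.sorted b (fun x => x) false).map
          (fun y => y * ((PySem.List.sorted a (fun x => x) false).countP (fun x => decide (x < y)) : Int))).sum
      = ((PySem.List.sorted b (fun x => x) false).map
          (fun y => y * (a.countP (fun x => decide (x < y)) : Int))).sum := by
        simp only [ha]
    _ = (b.map (fun y => y * (a.countP (fun x => decide (x < y)) : Int))).sum :=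
        ((PySem.List.sorted_perm b (fun x => x) false).map _).sum_eq

-- ===== VERDICT (by name: the statement is the Claim_ definition above) =====
theorem sum_value_lists_spec : Claim_equal_sum_value_lists := by
  intro a b _
  unfold Spec_sum_value_lists sum_value_lists sum_value_lists_alt
  by_cases hnil : a = [] ∨ b = []
  · rcases hnil with h | h <;> simp [h]
  · simp only [hnil, if_false]
    push Not at hnil
    set a' := PySem.List.sorted a (fun x => x) false with ha'
    set b' := PySem.List.sorted b (fun x => x) false with hb'
    have hpa : a'.Pairwise (· ≤ ·) := by
      simpa using PySem.List.sorted_pairwise a (fun x => x)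
    have hpb : b'.Pairwise (· ≤ ·) := by
      simpa using PySem.List.sorted_pairwise b (fun x => x)
    have h1 := pvLoop1_eq b' hpb a' [] b' 0 hpa (by simp) (by simp)
    have h2 := pvLoop2_eq a' hpa b' [] a'
      ((0 : Int) + (a'.map (fun x => x * (b'.countP (fun y => decide (y ≤ x)) : Int))).sum)
      hpb (by simp) (by simp)
    simp only [List.length_nil, Nat.cast_zero] at h1 h2
    rw [h1, h2]
    have := double_sum_identity a b
    rw [← this, ← sorted_sum_countP a b, ← sorted_sum_countP' a b, ← ha', ← hb']
    ring
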